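-- pv_equiv track=rewrite | github.com/Buddhi19/CSESproblems | CSES IntroductoryProblems/Two Knights/solution.py | dontattck
-- ===== SOURCE A (Python) =====
-- def dontattck(n):
--     solution=[0,6]
--     if n==1:
--         return [0]
--     if n==2:
--         return solution
--
--     size=3
--     while size<=n:
--         ways=size**2*(size**2-1)//2 -4*(size-2)*(size-1)
--         solution.append(ways)
--         size+=1
--
--     return solution
-- ===== SOURCE B (Python) =====
-- def dontattck(n):
--     solution = [0, 6]
--     if n == 1:
--         return [0]
--     if n == 2:
--         return solution
--     # Incremental update from the (k-1)x(k-1) board to the k x k board: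
--     # the new L-shaped border adds 2k-1 cells, which adds
--     # cells*(2k-1) + C(2k-1, 2) new unordered pairs, and the number of
--     # attacking pairs grows by 8*(k-2).
--     cells = 4        # 2x2 board
--     pairs = 6        # C(4, 2)
--     attacks = 0
--     for k in range(3, n + 1):
--         added = 2 * k - 1
--         pairs += cells * added + added * (added - 1) // 2
--         cells += added
--         attacks += 8 * (k - 2)
--         solution.append(pairs - attacks)
--     return solution
-- ===== Notes on version B (the rewrite author's own statement) =====
-- stated objective: alternative
-- what changed: A evaluates a closed-form formula for each board size; B instead carries running cell/pair/attack counters and updates them incrementally from each board size to the next, appending pairs minus attacks.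
import Mathlib
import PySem

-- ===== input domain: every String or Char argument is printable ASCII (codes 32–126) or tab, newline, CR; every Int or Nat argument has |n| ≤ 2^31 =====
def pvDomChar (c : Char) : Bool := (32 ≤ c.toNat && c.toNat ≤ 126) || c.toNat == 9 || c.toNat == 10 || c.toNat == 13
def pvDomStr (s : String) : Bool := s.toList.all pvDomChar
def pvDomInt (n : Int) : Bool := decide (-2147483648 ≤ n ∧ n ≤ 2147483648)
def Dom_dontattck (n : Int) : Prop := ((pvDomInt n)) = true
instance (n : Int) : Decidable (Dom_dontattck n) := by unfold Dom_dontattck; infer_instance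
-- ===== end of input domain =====

-- B replaces A's per-size closed-form formula by an incremental (dynamic-programming)
-- update of cell/pair/attack counts from one board size to the next; same return value.

-- ===== PORT A =====
-- while size<=n: ways=size**2*(size**2-1)//2 - 4*(size-2)*(size-1); solution.append(ways); size+=1
def dontattckLoopA : Nat → Int → List Int → List Int
  | 0, _, sol => sol
  | f + 1, size, sol =>
      dontattckLoopA f (size + 1)
        (sol ++ [PySem.Int.floordiv (size ^ 2 * (size ^ 2 - 1)) 2 - 4 * (size - 2) * (size - 1)])

def dontattck (n : Int) : List Int :=
  let solution : List Int := [0, 6]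
  if n == 1 then [0]
  else if n == 2 then solution
  else dontattckLoopA (n - 2).toNat 3 solution

-- ===== PORT B =====
-- the body of B's 'for k in range(3, n+1)' loop, state = (cells, pairs, attacks, solution)
def dontattckStepB (st : Int × Int × Int × List Int) (k : Int) : Int × Int × Int × List Int :=
  let added := 2 * k - 1
  let pairs := st.2.1 + st.1 * added + PySem.Int.floordiv (added * (added - 1)) 2
  let cells := st.1 + added
  let attacks := st.2.2.1 + 8 * (k - 2)
  (cells, pairs, attacks, st.2.2.2 ++ [pairs - attacks])

def dontattck_alt (n : Int) : List Int :=
  if n == 1 then [0]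
  else if n == 2 then [0, 6]
  else
    ((PySem.List.pyRange 3 (n + 1) 1).foldl dontattckStepB (4, 6, 0, [0, 6])).2.2.2

-- ===== PRECONDITION & SPEC =====
def Spec_dontattck (n : Int) (out : List Int) : Prop := out = dontattck_alt n
instance (n : Int) (out : List Int) : Decidable (Spec_dontattck n out) := by unfold Spec_dontattck; infer_instance

-- ===== CLAIM (what is proved, stated in full; the proofs are below) =====
def Claim_equal_dontattck : Prop := ∀ (n : Int), Dom_dontattck n → Spec_dontattck n (dontattck n)

-- ===== LEMMAS AND PROOFS =====

-- m*(m-1) is a product of consecutive integers, so its floor-half doubles back exactly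
theorem two_mul_half_pred_mul (m : Int) :
    2 * PySem.Int.floordiv (m * (m - 1)) 2 = m * (m - 1) := by
  have h : 2 ∣ m * (m - 1) := by
    rcases Int.even_or_odd m with ⟨t, ht⟩ | ⟨t, ht⟩
    · exact ⟨t * (m - 1), by rw [ht]; ring⟩
    · exact ⟨m * t, by rw [ht]; ring⟩
  obtain ⟨c, hc⟩ := h
  rw [hc, PySem.Int.floordiv_eq_ediv_of_pos (by norm_num),
    Int.mul_ediv_cancel_left _ (by norm_num)]

theorem floordiv_of_double {a p : Int} (h : 2 * p = a) :
    PySem.Int.floordiv a 2 = p := by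
  rw [← h, PySem.Int.floordiv_eq_ediv_of_pos (by norm_num),
    Int.mul_ediv_cancel_left _ (by norm_num)]

theorem loopB_eq (f : Nat) : ∀ (s cells pairs attacks : Int) (sol : List Int),
    cells = (s - 1) ^ 2 → 2 * pairs = (s - 1) ^ 2 * ((s - 1) ^ 2 - 1) →
    attacks = 4 * (s - 2) * (s - 3) →
    dontattckLoopA f s sol
      = ((PySem.List.pyRange s (s + f) 1).foldl dontattckStepB (cells, pairs, attacks, sol)).2.2.2 := by
  induction f with
  | zero =>
      intro s cells pairs attacks sol _ _ _
      rw [PySem.List.pyRange_one_eq_nil (by omega)]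
      rfl
  | succ f ih =>
      intro s cells pairs attacks sol hc hp ha
      have hp' : 2 * (pairs + cells * (2 * s - 1)
          + PySem.Int.floordiv ((2 * s - 1) * (2 * s - 1 - 1)) 2)
          = (s + 1 - 1) ^ 2 * ((s + 1 - 1) ^ 2 - 1) := by
        have := two_mul_half_pred_mul (2 * s - 1)
        rw [mul_add, mul_add, this, hc, hp]; ring
      rw [show s + ((f + 1 : Nat) : Int) = (s + 1) + (f : Nat) from by push_cast; ring,
        PySem.List.pyRange_one_cons (by omega)]
      simp only [List.foldl_cons]
      have hstep : dontattckStepB (cells, pairs, attacks, sol) s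
          = (cells + (2 * s - 1),
             pairs + cells * (2 * s - 1) + PySem.Int.floordiv ((2 * s - 1) * (2 * s - 1 - 1)) 2,
             attacks + 8 * (s - 2),
             sol ++ [pairs + cells * (2 * s - 1)
               + PySem.Int.floordiv ((2 * s - 1) * (2 * s - 1 - 1)) 2
               - (attacks + 8 * (s - 2))]) := rfl
      rw [dontattckLoopA, hstep,
        ← ih (s + 1) _ _ _ _ (by rw [hc]; ring) hp' (by rw [ha]; ring)]
      have hfd : PySem.Int.floordiv (s ^ 2 * (s ^ 2 - 1)) 2
          = pairs + cells * (2 * s - 1)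
            + PySem.Int.floordiv ((2 * s - 1) * (2 * s - 1 - 1)) 2 := by
        apply floordiv_of_double
        rw [hp']; ring
      congr 1
      rw [hfd, ha]
      congr 2
      ring

-- ===== VERDICT (by name: the statement is the Claim_ definition above) =====
theorem dontattck_spec : Claim_equal_dontattck := by
  intro n _
  unfold Spec_dontattck dontattck dontattck_alt
  by_cases h1 : n = 1
  · simp [h1]
  by_cases h2 : n = 2
  · simp [h2]
  simp only [beq_iff_eq, h1, h2, if_false]
  by_cases h3 : 3 ≤ n
  · rw [loopB_eq ((n - 2).toNat) 3 4 6 0 [0, 6] (by norm_num) (by norm_num) (by norm_num),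
      show (3 : Int) + (((n - 2).toNat : Nat) : Int) = n + 1 from by omega]
  · have hf : (n - 2).toNat = 0 := by omega
    rw [hf, PySem.List.pyRange_one_eq_nil (by omega)]
    rfl
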